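-- pv_equiv track=rewrite | github.com/shanzhaii/advent-of-code-2024-shanzhaii | project/day9/disk_fragmenter.py | defragment
-- ===== SOURCE A (Python) =====
-- def defragment(uncompressed_disk_map):
--     disk_map = [char for char in uncompressed_disk_map]
--     new_map = []
--     while disk_map:
--         front = disk_map[0]
--         if front != '.':
--             new_map.append(disk_map.pop(0))
--         else:
--             end = disk_map.pop(len(disk_map) - 1)
--             if disk_map:
--                 disk_map[0] = end
--     return new_map
-- ===== SOURCE B (Python) =====
-- def defragment(uncompressed_disk_map):
--     s = uncompressed_disk_map
--     out = []
--     i, j = 0, len(s) - 1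
--     while i <= j:
--         if s[i] != '.':
--             out.append(s[i])
--             i += 1
--         else:
--             while i < j and s[j] == '.':
--                 j -= 1
--             if i < j:
--                 out.append(s[j])
--                 i += 1
--                 j -= 1
--             else:
--                 break
--     return out
-- ===== Notes on version B (the rewrite author's own statement) =====
-- stated objective: faster
-- what changed: Replaced A's repeated list mutation (pop(0)/pop() on a shrinking list, overwriting the front slot) with a single two-pointer pass over the immutable string, so no element is ever moved.
import Mathlib
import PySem

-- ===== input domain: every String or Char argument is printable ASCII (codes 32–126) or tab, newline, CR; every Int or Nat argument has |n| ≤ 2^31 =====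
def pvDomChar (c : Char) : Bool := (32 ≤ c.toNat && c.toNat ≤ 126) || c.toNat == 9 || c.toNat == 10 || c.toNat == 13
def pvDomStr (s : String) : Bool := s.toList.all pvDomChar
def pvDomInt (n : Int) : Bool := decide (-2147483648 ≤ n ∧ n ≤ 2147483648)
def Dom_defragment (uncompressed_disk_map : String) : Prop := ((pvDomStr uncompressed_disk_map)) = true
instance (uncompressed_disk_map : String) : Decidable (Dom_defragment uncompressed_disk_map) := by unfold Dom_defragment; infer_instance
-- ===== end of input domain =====

-- B replaces A's mutating pop(0)/pop() loop by a two-pointer single pass (faster; a timing run measures the speed-up).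

-- ===== PORT A =====
-- A's while loop: pop the front if it is not '.', otherwise pop the last element and overwrite the front slot with it.
def defragLoopA : List Char → List String → List String
  | [], acc => acc
  | front :: rest, acc =>
    if front ≠ '.' then defragLoopA rest (acc ++ [String.singleton front])
    else
      match h : (front :: rest).dropLast with
      | [] => acc
      | _ :: t => defragLoopA ((front :: rest).getLast (by simp) :: t) acc
termination_by l _ => l.length
decreasing_by
  · simp
  · rename_i h _
    have hl : ((front :: rest).dropLast).length = rest.length := by simp
    rw [h] at hl
    simp at hl ⊢
    omega

def defragment (uncompressed_disk_map : String) : List String :=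
  defragLoopA uncompressed_disk_map.toList []

-- ===== PORT B =====
-- inner while of Source B: move j down past '.' while i < j
def skipDots (cs : List Char) (i : Nat) (j : Nat) : Nat :=
  if i < j ∧ cs.getD j '.' = '.' then skipDots cs i (j - 1) else j
termination_by j
decreasing_by omega

theorem skipDots_le (cs : List Char) (i j : Nat) : skipDots cs i j ≤ j := by
  induction j using Nat.strong_induction_on with
  | _ j ih =>
    rw [skipDots]
    split
    · rename_i h
      have := ih (j - 1) (by omega)
      omega
    · exact le_refl j

-- outer while of Source B, on indices i, j
def defragLoopB (cs : List Char) (i j : Nat) (out : List String) : List String :=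
  if i ≤ j then
    if cs.getD i '.' ≠ '.' then
      defragLoopB cs (i + 1) j (out ++ [String.singleton (cs.getD i '.')])
    else
      if i < skipDots cs i j then
        defragLoopB cs (i + 1) (skipDots cs i j - 1)
          (out ++ [String.singleton (cs.getD (skipDots cs i j) '.')])
      else out
  else out
termination_by j + 1 - i
decreasing_by
  · omega
  · have := skipDots_le cs i j
    omega

def defragment_alt (uncompressed_disk_map : String) : List String :=
  defragLoopB uncompressed_disk_map.toList 0 (uncompressed_disk_map.toList.length - 1) []

-- ===== PRECONDITION & SPEC =====
def Spec_defragment (uncompressed_disk_map : String) (out : List String) : Prop := out = defragment_alt uncompressed_disk_map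
instance (uncompressed_disk_map : String) (out : List String) : Decidable (Spec_defragment uncompressed_disk_map out) := by unfold Spec_defragment; infer_instance

-- ===== CLAIM (what is proved, stated in full; the proofs are below) =====
def Claim_equal_defragment : Prop := ∀ (uncompressed_disk_map : String), Dom_defragment uncompressed_disk_map → Spec_defragment uncompressed_disk_map (defragment uncompressed_disk_map)

-- ===== LEMMAS AND PROOFS =====

-- one-step unfolding lemmas for A's loop
theorem A_nil (acc : List String) : defragLoopA [] acc = acc := by
  rw [defragLoopA]

theorem A_cons_ne (front : Char) (rest : List Char) (acc : List String) (hf : front ≠ '.') :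
    defragLoopA (front :: rest) acc = defragLoopA rest (acc ++ [String.singleton front]) := by
  rw [defragLoopA]; simp [hf]

theorem A_dot_nil (acc : List String) : defragLoopA ['.'] acc = acc := by
  rw [defragLoopA]; simp

theorem A_dot_cons (rest : List Char) (acc : List String) (h : rest ≠ []) :
    defragLoopA ('.' :: rest) acc = defragLoopA (rest.getLast h :: rest.dropLast) acc := by
  cases rest with
  | nil => exact absurd rfl h
  | cons r rs => rw [defragLoopA]; simp

-- the window cs[a..j] (inclusive), [] when a > j
def seg (cs : List Char) (a j : Nat) : List Char := (cs.drop a).take (j + 1 - a)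

theorem seg_nil (cs : List Char) (a j : Nat) (h : j + 1 ≤ a) : seg cs a j = [] := by
  simp [seg, Nat.sub_eq_zero_of_le h]

theorem seg_cons (cs : List Char) (a j : Nat) (hj : j < cs.length) (ha : a ≤ j) :
    seg cs a j = cs.getD a '.' :: seg cs (a + 1) j := by
  unfold seg
  rw [List.getD_eq_getElem cs '.' (by omega), List.drop_eq_getElem_cons (by omega)]
  rw [show j + 1 - a = (j - a) + 1 by omega, List.take_succ_cons,
    show j + 1 - (a + 1) = j - a by omega]

theorem seg_ne_nil (cs : List Char) (a j : Nat) (hj : j < cs.length) (ha : a ≤ j) :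
    seg cs a j ≠ [] := by
  rw [seg_cons cs a j hj ha]; simp

theorem seg_getLast (cs : List Char) (a j : Nat) (hj : j < cs.length) (ha : a ≤ j)
    (h : seg cs a j ≠ []) : (seg cs a j).getLast h = cs.getD j '.' := by
  rw [List.getLast_eq_getElem]
  have hlen : (seg cs a j).length = j + 1 - a := by
    simp [seg]; omega
  rw [List.getD_eq_getElem cs '.' (by omega)]
  simp only [seg] at *
  rw [List.getElem_take, List.getElem_drop]
  congr 1
  omega

theorem seg_dropLast (cs : List Char) (a j : Nat) (hj : j < cs.length) (ha : a ≤ j)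
    (h1 : 1 ≤ j) : (seg cs a j).dropLast = seg cs a (j - 1) := by
  unfold seg
  rw [List.dropLast_eq_take, List.take_take, List.length_take, List.length_drop]
  congr 1
  omega

theorem main_lemma (cs : List Char) :
    ∀ n i j acc, j + 1 - i ≤ n → i ≤ j → j < cs.length →
      defragLoopA (seg cs i j) acc = defragLoopB cs i j acc := by
  intro n
  induction n with
  | zero => intro i j acc h hij hj; omega
  | succ n ih =>
    intro i j acc h hij hj
    rw [seg_cons cs i j hj hij]
    by_cases hf : cs.getD i '.' = '.'
    · -- front is '.'
      rw [hf]
      by_cases hij' : i < j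
      · -- window has at least two cells
        have hne : seg cs (i + 1) j ≠ [] := seg_ne_nil cs (i + 1) j hj (by omega)
        rw [A_dot_cons _ _ hne]
        rw [seg_getLast cs (i + 1) j hj (by omega) hne]
        rw [seg_dropLast cs (i + 1) j hj (by omega) (by omega)]
        by_cases hdj : cs.getD j '.' = '.'
        · -- last is also '.': both sides shrink the window from the right
          rw [hdj, show ('.' : Char) = cs.getD i '.' from hf.symm]
          rw [← seg_cons cs i (j - 1) (by omega) (by omega)]
          -- B side: one skipDots step folds (i, j) into (i, j - 1)
          have hskip : skipDots cs i j = skipDots cs i (j - 1) := by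
            rw [skipDots]; rw [if_pos ⟨hij', hdj⟩]
          have hB : defragLoopB cs i j acc = defragLoopB cs i (j - 1) acc := by
            conv_lhs => rw [defragLoopB]
            rw [if_pos (show i ≤ j by omega), if_neg (not_ne_iff.mpr hf), hskip]
            conv_rhs => rw [defragLoopB]
            rw [if_pos (show i ≤ j - 1 by omega), if_neg (not_ne_iff.mpr hf)]
          rw [hB]
          exact ih i (j - 1) acc (by omega) (by omega) (by omega)
        · -- last is a file char: it is appended and both pointers move
          rw [A_cons_ne _ _ _ hdj]
          have hskip : skipDots cs i j = j := by
            rw [skipDots]; rw [if_neg (by tauto)]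
          rw [defragLoopB]
          rw [if_pos (show i ≤ j by omega), if_neg (not_ne_iff.mpr hf), hskip,
            if_pos hij']
          by_cases hij2 : i + 1 ≤ j - 1
          · exact ih (i + 1) (j - 1) _ (by omega) hij2 (by omega)
          · rw [seg_nil cs (i + 1) (j - 1) (by omega), A_nil]
            rw [defragLoopB, if_neg (by omega)]
      · -- i = j: the lone '.' is dropped
        have hjeq : j = i := by omega
        rw [seg_nil cs (i + 1) j (by omega), A_dot_nil]
        have hskip : skipDots cs i j = j := by
          rw [skipDots]; rw [if_neg (by tauto)]
        rw [defragLoopB, if_pos (show i ≤ j by omega), if_neg (not_ne_iff.mpr hf),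
          hskip, if_neg (by omega)]
    · -- front is a file char: append it and advance
      rw [A_cons_ne _ _ _ hf]
      rw [defragLoopB, if_pos (show i ≤ j by omega), if_pos hf]
      by_cases hij' : i + 1 ≤ j
      · exact ih (i + 1) j _ (by omega) hij' hj
      · rw [seg_nil cs (i + 1) j (by omega), A_nil]
        rw [defragLoopB, if_neg (by omega)]

-- ===== VERDICT (by name: the statement is the Claim_ definition above) =====
theorem defragment_spec : Claim_equal_defragment := by
  intro s _
  unfold Spec_defragment defragment defragment_alt
  cases hcs : s.toList with
  | nil => simp [defragLoopA, defragLoopB, skipDots]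
  | cons c t =>
    have hlen : 0 < (c :: t).length := by simp
    have : seg (c :: t) 0 ((c :: t).length - 1) = c :: t := by
      simp [seg]
    calc defragLoopA (c :: t) [] = defragLoopA (seg (c :: t) 0 ((c :: t).length - 1)) [] := by rw [this]
      _ = defragLoopB (c :: t) 0 ((c :: t).length - 1) [] :=
        main_lemma (c :: t) ((c :: t).length) 0 ((c :: t).length - 1) [] (by omega) (by omega) (by omega)
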